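-- pv_equiv track=rewrite | github.com/adisve/advent-of-code-2023 | 3/main.py | get_num_indices
-- ===== SOURCE A (Python) =====
-- def get_num_indices(schematic):
--     number_indices = []
--     for y in range(len(schematic)):
--         start_index = None
--         for x in range(len(schematic[y])):
--             if schematic[y][x].isnumeric():
--                 if start_index is None:
--                     start_index = x
--                 if x == len(schematic[y]) - 1 or not schematic[y][x + 1].isnumeric():
--                     end_index = x
--                     number_indices.append((start_index, end_index, y))
--                     start_index = None
--             else:
--                 start_index = None
--     return number_indices
-- ===== SOURCE B (Python) =====
-- def _row_spans(row, y):
--     # Two-pointer run scan: find the start of a digit run, jump to its end, emit one span.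
--     spans = []
--     n = len(row)
--     x = 0
--     while x < n:
--         if row[x].isnumeric():
--             end = x
--             while end + 1 < n and row[end + 1].isnumeric():
--                 end += 1
--             spans.append((x, end, y))
--             x = end + 1
--         else:
--             x += 1
--     return spans
--
-- def get_num_indices(schematic):
--     out = []
--     for y, row in enumerate(schematic):
--         out += _row_spans(row, y)
--     return out
-- ===== Notes on version B (the rewrite author's own statement) =====
-- stated objective: alternative
-- what changed: Replaces A's per-character state machine (Optional start_index with a one-character lookahead test at every digit) by a two-pointer run scanner: find the start of a digit run, advance a second pointer to the run's end, emit the span and jump past it.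
import Mathlib
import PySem

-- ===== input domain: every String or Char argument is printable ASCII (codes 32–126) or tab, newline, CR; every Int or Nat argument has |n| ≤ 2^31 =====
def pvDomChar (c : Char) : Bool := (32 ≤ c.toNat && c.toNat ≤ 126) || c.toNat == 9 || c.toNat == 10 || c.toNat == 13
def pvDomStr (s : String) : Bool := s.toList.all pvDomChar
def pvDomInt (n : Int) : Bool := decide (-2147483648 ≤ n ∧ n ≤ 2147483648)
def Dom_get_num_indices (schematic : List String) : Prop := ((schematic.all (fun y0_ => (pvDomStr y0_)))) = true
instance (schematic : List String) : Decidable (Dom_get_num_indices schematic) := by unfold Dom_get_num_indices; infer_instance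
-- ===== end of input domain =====

-- B replaces A's per-character Optional-start state machine by a two-pointer run scanner
-- (find a digit-run's start, jump to its end, emit the span); alternative decomposition, same cost.


-- str.isnumeric(): on the printable-ASCII domain Dom_ this coincides with isdigit ('0'-'9'); exact there.
def pyIsNumeric (c : Char) : Bool := PySem.Chars.isdigit c

-- ===== PORT A =====
-- A's inner loop body: state = (accumulated spans, Optional start_index)
def innerStepA (row : List Char) (y : Int) (st : List (Int × Int × Int) × Option Nat) (x : Nat) :
    List (Int × Int × Int) × Option Nat :=
  if pyIsNumeric (row.getD x ' ') then
    let s : Nat := match st.2 with | none => x | some s => s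
    if x = row.length - 1 ∨ ¬ pyIsNumeric (row.getD (x + 1) ' ') then
      (st.1 ++ [((s : Int), (x : Int), y)], none)
    else
      (st.1, some s)
  else
    (st.1, none)

-- the body of A's outer loop for one row (start_index = None, then the inner for over range(len(row)))
def rowA (row : List Char) (y : Int) (acc : List (Int × Int × Int)) : List (Int × Int × Int) :=
  ((List.range row.length).foldl (innerStepA row y) (acc, none)).1

def get_num_indices (schematic : List String) : List (Int × Int × Int) :=
  (PySem.List.pyRange 0 (PySem.List.len schematic)).foldl
    (fun acc y => rowA (PySem.List.pyGetD schematic y "").toList y acc) []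

-- ===== PORT B =====
-- B's inner while: advance `end` to the last index of the digit run starting at x
def runEnd (row : List Char) (x : Nat) : Nat :=
  if h : x + 1 < row.length ∧ pyIsNumeric (row.getD (x + 1) ' ') = true then
    runEnd row (x + 1)
  else x
termination_by row.length - x
decreasing_by omega

theorem runEnd_ge (row : List Char) (x : Nat) : x ≤ runEnd row x := by
  fun_induction runEnd with
  | case1 x h ih => omega
  | case2 x h => exact le_refl x

-- B's outer while over x (python _row_spans)
def scanRow (row : List Char) (y : Int) (x : Nat) : List (Int × Int × Int) :=
  if h : x < row.length then
    if pyIsNumeric (row.getD x ' ') then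
      ((x : Int), (runEnd row x : Int), y) :: scanRow row y (runEnd row x + 1)
    else
      scanRow row y (x + 1)
  else []
termination_by row.length - x
decreasing_by
  · have := runEnd_ge row x; omega
  · omega

def get_num_indices_alt (schematic : List String) : List (Int × Int × Int) :=
  (PySem.List.enumerate schematic).foldl (fun acc p => acc ++ scanRow p.2.toList p.1 0) []

-- ===== PRECONDITION & SPEC =====
def Spec_get_num_indices (schematic : List String) (out : List (Int × Int × Int)) : Prop := out = get_num_indices_alt schematic
instance (schematic : List String) (out : List (Int × Int × Int)) : Decidable (Spec_get_num_indices schematic out) := by unfold Spec_get_num_indices; infer_instance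

-- ===== CLAIM (what is proved, stated in full; the proofs are below) =====
def Claim_equal_get_num_indices : Prop := ∀ (schematic : List String), Dom_get_num_indices schematic → Spec_get_num_indices schematic (get_num_indices schematic)

-- ===== LEMMAS AND PROOFS =====

theorem runEnd_run (row : List Char) (x : Nat)
    (h : x + 1 < row.length ∧ pyIsNumeric (row.getD (x + 1) ' ') = true) :
    runEnd row x = runEnd row (x + 1) := by
  rw [runEnd, dif_pos h]

theorem runEnd_stop (row : List Char) (x : Nat)
    (h : ¬ (x + 1 < row.length ∧ pyIsNumeric (row.getD (x + 1) ' ') = true)) :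
    runEnd row x = x := by
  rw [runEnd, dif_neg h]

theorem scanRow_stop (row : List Char) (y : Int) (x : Nat) (h : ¬ x < row.length) :
    scanRow row y x = [] := by
  rw [scanRow, dif_neg h]

theorem scanRow_digit (row : List Char) (y : Int) (x : Nat) (h : x < row.length)
    (hd : pyIsNumeric (row.getD x ' ') = true) :
    scanRow row y x = ((x : Int), (runEnd row x : Int), y) :: scanRow row y (runEnd row x + 1) := by
  rw [scanRow, dif_pos h, if_pos hd]

theorem scanRow_nondigit (row : List Char) (y : Int) (x : Nat) (h : x < row.length)
    (hd : ¬ pyIsNumeric (row.getD x ' ') = true) :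
    scanRow row y x = scanRow row y (x + 1) := by
  rw [scanRow, dif_pos h, if_neg hd]

-- the heart: A's inner fold from position x, in both states, equals B's run scanner
theorem inner_combined (row : List Char) (y : Int) :
    ∀ k x, row.length - x ≤ k →
    ((∀ acc, (List.range' x (row.length - x)).foldl (innerStepA row y) (acc, none)
        = (acc ++ scanRow row y x, none))
     ∧ (∀ acc s, x < row.length → pyIsNumeric (row.getD x ' ') = true →
        (List.range' x (row.length - x)).foldl (innerStepA row y) (acc, some s)
        = (acc ++ ((s : Int), (runEnd row x : Int), y) :: scanRow row y (runEnd row x + 1), none))) := by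
  intro k
  induction k with
  | zero =>
    intro x hk
    constructor
    · intro acc
      have hx : ¬ x < row.length := by omega
      have h0 : row.length - x = 0 := by omega
      simp [h0, scanRow_stop row y x hx]
    · intro acc s hx _; omega
  | succ k ih =>
    intro x hk
    by_cases hx : x < row.length
    · have hrec : row.length - (x + 1) ≤ k := by omega
      have hsplit : row.length - x = (row.length - (x + 1)) + 1 := by omega
      have hcons : List.range' x (row.length - x) = x :: List.range' (x + 1) (row.length - (x + 1)) := by
        rw [hsplit, List.range'_succ]
      constructor
      · intro acc
        rw [hcons, List.foldl_cons]
        by_cases hd : pyIsNumeric (row.getD x ' ') = true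
        · by_cases hrun : x + 1 < row.length ∧ pyIsNumeric (row.getD (x + 1) ' ') = true
          · have hcond : ¬ (x = row.length - 1 ∨ ¬ pyIsNumeric (row.getD (x + 1) ' ') = true) := by
              push Not; exact ⟨by omega, hrun.2⟩
            simp only [innerStepA, if_pos hd, if_neg hcond]
            rw [(ih (x + 1) hrec).2 acc x hrun.1 hrun.2]
            rw [scanRow_digit row y x hx hd, runEnd_run row x hrun]
          · have hcond : x = row.length - 1 ∨ ¬ pyIsNumeric (row.getD (x + 1) ' ') = true := by
              rcases Classical.em (x + 1 < row.length) with h1 | h1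
              · exact Or.inr (fun hc => hrun ⟨h1, hc⟩)
              · exact Or.inl (by omega)
            simp only [innerStepA, if_pos hd, if_pos hcond]
            rw [(ih (x + 1) hrec).1 (acc ++ [((x : Int), (x : Int), y)])]
            rw [scanRow_digit row y x hx hd, runEnd_stop row x hrun]
            simp
        · simp only [innerStepA, if_neg hd]
          rw [(ih (x + 1) hrec).1 acc, scanRow_nondigit row y x hx hd]
      · intro acc s _ hd
        rw [hcons, List.foldl_cons]
        by_cases hrun : x + 1 < row.length ∧ pyIsNumeric (row.getD (x + 1) ' ') = true
        · have hcond : ¬ (x = row.length - 1 ∨ ¬ pyIsNumeric (row.getD (x + 1) ' ') = true) := by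
            push Not; exact ⟨by omega, hrun.2⟩
          simp only [innerStepA, if_pos hd, if_neg hcond]
          rw [(ih (x + 1) hrec).2 acc s hrun.1 hrun.2]
          rw [runEnd_run row x hrun]
        · have hcond : x = row.length - 1 ∨ ¬ pyIsNumeric (row.getD (x + 1) ' ') = true := by
            rcases Classical.em (x + 1 < row.length) with h1 | h1
            · exact Or.inr (fun hc => hrun ⟨h1, hc⟩)
            · exact Or.inl (by omega)
          simp only [innerStepA, if_pos hd, if_pos hcond]
          rw [(ih (x + 1) hrec).1 (acc ++ [((s : Int), (x : Int), y)])]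
          rw [runEnd_stop row x hrun]
          simp
    · constructor
      · intro acc
        have h0 : row.length - x = 0 := by omega
        simp [h0, scanRow_stop row y x hx]
      · intro acc s hxx _
        omega

theorem rowA_eq_scanRow (row : List Char) (y : Int) (acc : List (Int × Int × Int)) :
    rowA row y acc = acc ++ scanRow row y 0 := by
  unfold rowA
  have h := ((inner_combined row y row.length 0 (by omega)).1 acc)
  rw [List.range_eq_range']
  simpa using congrArg Prod.fst h

-- ===== VERDICT (by name: the statement is the Claim_ definition above) =====
theorem get_num_indices_spec : Claim_equal_get_num_indices := by
  intro schematic _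
  unfold Spec_get_num_indices get_num_indices get_num_indices_alt
  rw [PySem.List.enumerate_eq_map_pyRange schematic "", List.foldl_map]
  have hf : (fun (acc : List (Int × Int × Int)) (y : Int) =>
        rowA (PySem.List.pyGetD schematic y "").toList y acc)
      = (fun acc j => acc ++ scanRow (PySem.List.pyGetD schematic j "").toList j 0) := by
    funext acc j
    exact rowA_eq_scanRow _ _ _
  rw [hf]
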